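-- pv_equiv track=rewrite | github.com/pypi-data/pypi-mirror-164 | packages/caf.toolkit/caf.toolkit-0.0.3.tar.gz/caf.toolkit-0.0.3/src/caf/toolkit/toolbox.py | list_safe_remove
-- ===== SOURCE A (Python) =====
-- from typing import Any
--
-- def list_safe_remove(
--     lst: list[Any],
--     remove: list[Any],
--     throw_error: bool = False,
--     inplace: bool = False,
-- ) -> list[Any]:
--     """
--     Remove items from a list without raising an error.
--
--     Parameters
--     ----------
--     lst:
--         The list to remove items from
--
--     remove:
--         The items to remove from lst
--
--     throw_error:
--         Whether to raise an error or not when an item in `remove` is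
--         not contained in lst
--
--     inplace:
--         Whether to remove the items in-place, or return a copy of lst
--
--     Returns
--     -------
--     lst:
--         lst with removed items removed from it
--     """
--     # Init
--     if not inplace:
--         lst = lst.copy()
--
--     for item in remove:
--         try:
--             lst.remove(item)
--         except ValueError as exception:
--             if throw_error:
--                 raise exception
--
--     return lst
-- ===== SOURCE B (Python) =====
-- def list_safe_remove(lst, remove, throw_error=False, inplace=False):
--     # Counter of how many of each value to drop; one pass over lst keeps an
--     # element once its remaining drop-count is exhausted (first occurrences
--     # are dropped, exactly as repeated list.remove would do).
--     need = {}
--     for item in remove: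
--         need[item] = need.get(item, 0) + 1
--     if throw_error:
--         for item, cnt in need.items():
--             if cnt > lst.count(item):
--                 raise ValueError("list.remove(x): x not in list")
--     result = []
--     for x in lst:
--         c = need.get(x, 0)
--         if c > 0:
--             need[x] = c - 1
--         else:
--             result.append(x)
--     if inplace:
--         lst[:] = result
--         return lst
--     return result
-- ===== Notes on version B (the rewrite author's own statement) =====
-- stated objective: faster
-- what changed: Replaces the loop of repeated list.remove scans with a dict of removal counts built once plus a single pass over lst that keeps an element when its remaining count is zero (an up-front count check reproduces the ValueError when throw_error is set); a timing run measured B faster (A timed out at n=16384 where B returned; ~70x at n=4096).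
import Mathlib
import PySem

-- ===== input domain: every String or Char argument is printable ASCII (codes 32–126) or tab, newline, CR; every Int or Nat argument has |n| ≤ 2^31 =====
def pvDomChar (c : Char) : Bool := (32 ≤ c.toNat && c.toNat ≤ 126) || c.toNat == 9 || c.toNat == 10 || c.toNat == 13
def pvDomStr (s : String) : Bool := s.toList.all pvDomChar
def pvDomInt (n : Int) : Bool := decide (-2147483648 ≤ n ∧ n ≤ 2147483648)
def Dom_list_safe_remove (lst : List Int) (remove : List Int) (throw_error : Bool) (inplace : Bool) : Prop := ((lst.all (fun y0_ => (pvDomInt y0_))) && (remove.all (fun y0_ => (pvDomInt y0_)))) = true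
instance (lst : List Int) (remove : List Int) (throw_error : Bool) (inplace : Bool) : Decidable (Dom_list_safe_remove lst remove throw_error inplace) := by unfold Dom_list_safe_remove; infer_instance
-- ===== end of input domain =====

-- B replaces A's repeated list.remove scans by a removal-count dict plus one pass over lst
-- (faster in a timing run: A timed out at n=16384 where B returned; ~70x at n=4096); equivalence is about the RETURN value — on success B performs the same inplace
-- mutation as A, but where A raises (outside Pre_) A may have partially mutated lst.

-- ===== PORT A =====
-- for item in remove: try lst.remove(item) except ValueError: (re-raise only if throw_error
-- — that raise is excluded by Pre_, so the failed removal leaves lst unchanged here)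
def list_safe_remove (lst : List Int) (remove : List Int) (throw_error : Bool) (inplace : Bool) : List Int :=
  remove.foldl (fun acc item =>
    match PySem.List.remove? acc item with
    | some l => l
    | none => acc) lst

-- ===== PORT B =====
-- need = {}; for item in remove: need[item] = need.get(item,0)+1; then one pass over lst.
-- (Source B's throw_error pre-check loop only raises — outside Pre_ — and never changes the
-- returned value, so it contributes nothing here; the inplace branch returns the same list.)
def list_safe_remove_alt (lst : List Int) (remove : List Int) (throw_error : Bool) (inplace : Bool) : List Int :=
  let need : PySem.Dict Int Int :=
    remove.foldl (fun d x => d.insert x (d.getD x 0 + 1)) PySem.Dict.empty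
  (lst.foldl (fun (p : PySem.Dict Int Int × List Int) x =>
      let c := p.1.getD x 0
      if c > 0 then (p.1.insert x (c - 1), p.2) else (p.1, p.2 ++ [x]))
    (need, [])).2

-- ===== PRECONDITION & SPEC =====
-- Pre_ excludes exactly the inputs on which Python A raises: throw_error=True while some
-- value occurs more often in `remove` than in `lst` (B raises there too).
def Pre_list_safe_remove (lst : List Int) (remove : List Int) (throw_error : Bool) (inplace : Bool) : Prop :=
  throw_error = true → ∀ v ∈ remove, remove.count v ≤ lst.count v
instance (lst : List Int) (remove : List Int) (throw_error : Bool) (inplace : Bool) : Decidable (Pre_list_safe_remove lst remove throw_error inplace) := by unfold Pre_list_safe_remove; infer_instance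
def pvWitness_list_safe_remove : List Int × List Int × Bool × Bool := ([1, 2, 2, 3], [2, 3], true, false)

def Spec_list_safe_remove (lst : List Int) (remove : List Int) (throw_error : Bool) (inplace : Bool) (out : List Int) : Prop := out = list_safe_remove_alt lst remove throw_error inplace
instance (lst : List Int) (remove : List Int) (throw_error : Bool) (inplace : Bool) (out : List Int) : Decidable (Spec_list_safe_remove lst remove throw_error inplace out) := by unfold Spec_list_safe_remove; infer_instance

-- ===== CLAIM (what is proved, stated in full; the proofs are below) =====
def Claim_equal_list_safe_remove : Prop := ∀ (lst : List Int) (remove : List Int) (throw_error : Bool) (inplace : Bool), Dom_list_safe_remove lst remove throw_error inplace → Pre_list_safe_remove lst remove throw_error inplace → Spec_list_safe_remove lst remove throw_error inplace (list_safe_remove lst remove throw_error inplace)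

-- ===== LEMMAS AND PROOFS =====

-- common spec: keep each element whose remaining removal count is zero
def keepF : List Int → (Int → Int) → List Int
  | [], _ => []
  | x :: xs, n => if n x > 0 then keepF xs (fun v => if v = x then n x - 1 else n v) else x :: keepF xs n

theorem keepF_zero (lst : List Int) : keepF lst (fun _ => 0) = lst := by
  induction lst with
  | nil => rfl
  | cons x xs ih => simpa [keepF] using ih

-- A's single removal step
def stepA (acc : List Int) (item : Int) : List Int :=
  match PySem.List.remove? acc item with
  | some l => l
  | none => acc

theorem keepF_bump (r : Int) (lst : List Int) (n : Int → Int) (hn : ∀ v, 0 ≤ n v) :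
    keepF lst (fun v => if v = r then n v + 1 else n v) = keepF (stepA lst r) n := by
  induction lst generalizing n with
  | nil => rfl
  | cons x xs ih =>
    by_cases hx : x = r
    · subst hx
      have h1 : stepA (x :: xs) x = xs := by
        simp [stepA, PySem.List.remove?_cons_self]
      rw [h1]
      have hpos : (if x = x then n x + 1 else n x) > 0 := by
        simp; linarith [hn x]
      rw [keepF, if_pos hpos]
      congr 1
      funext v
      by_cases hv : v = x <;> simp [hv]
    · have h1 : stepA (x :: xs) r = x :: stepA xs r := by
        simp only [stepA, PySem.List.remove?_cons_of_ne xs hx]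
        cases h : PySem.List.remove? xs r <;> simp [h]
      rw [h1]
      by_cases hpos : n x > 0
      · have hL : (if x = r then n x + 1 else n x) > 0 := by simp [hx, hpos]
        rw [keepF, if_pos hL, keepF, if_pos hpos]
        have hcomm : (fun v => if v = x then (if x = r then n x + 1 else n x) - 1 else if v = r then n v + 1 else n v)
            = (fun v => if v = r then (if v = x then n x - 1 else n v) + 1 else (if v = x then n x - 1 else n v)) := by
          funext v
          by_cases hvx : v = x <;> by_cases hvr : v = r <;> simp_all
        rw [hcomm, ih _ (fun v => by by_cases hvx : v = x <;> simp [hvx] <;> [omega; exact hn v])]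
      · have hL : ¬ (if x = r then n x + 1 else n x) > 0 := by simp [hx, hpos]
        rw [keepF, if_neg hL, keepF, if_neg hpos, ih _ hn]

theorem portA_eq_keepF (lst remove : List Int) :
    remove.foldl stepA lst = keepF lst (fun v => (remove.count v : Int)) := by
  induction remove generalizing lst with
  | nil => simpa using (keepF_zero lst).symm
  | cons r rs ih =>
    rw [List.foldl_cons, ih]
    rw [← keepF_bump r lst (fun v => (rs.count v : Int)) (fun v => by positivity)]
    congr 1
    funext v
    by_cases hv : v = r
    · simp [hv, List.count_cons]
    · have hrv : ¬ r = v := fun h => hv h.symm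
      simp [hv, hrv, List.count_cons]

theorem portB_loop (lst : List Int) (d : PySem.Dict Int Int) (acc : List Int) (n : Int → Int)
    (hd : ∀ v, d.getD v 0 = n v) :
    (lst.foldl (fun (p : PySem.Dict Int Int × List Int) x =>
      let c := p.1.getD x 0
      if c > 0 then (p.1.insert x (c - 1), p.2) else (p.1, p.2 ++ [x])) (d, acc)).2
    = acc ++ keepF lst n := by
  induction lst generalizing d acc n with
  | nil => simp [keepF]
  | cons x xs ih =>
    rw [List.foldl_cons]
    by_cases hpos : d.getD x 0 > 0
    · rw [keepF]
      simp only [hd x] at hpos ⊢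
      rw [if_pos hpos, if_pos hpos]
      exact ih _ _ _ (fun v => by
        by_cases hv : v = x
        · rw [hv, PySem.Dict.getD_insert_self]; simp [hd]
        · rw [PySem.Dict.getD_insert_of_ne _ _ _ hv]
          simp [hd, hv])
    · rw [keepF]
      simp only [hd x] at hpos ⊢
      rw [if_neg hpos, if_neg hpos, ih _ _ _ hd]
      simp

-- ===== VERDICT (by name: the statement is the Claim_ definition above) =====
theorem list_safe_remove_spec : Claim_equal_list_safe_remove := by
  intro lst remove throw_error inplace _ _
  unfold Spec_list_safe_remove list_safe_remove list_safe_remove_alt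
  rw [portB_loop lst _ [] (fun v => (remove.count v : Int))
    (fun v => by
      rw [PySem.Dict.foldl_insert_getD_add_one_eq_counter, PySem.Dict.getD_counter])]
  simpa [stepA] using portA_eq_keepF lst remove
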